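-- pv_equiv track=rewrite | github.com/PHPAnton/Py-C-Task2 | Task2.py | calculate_bengal_fire_hours
-- ===== SOURCE A (Python) =====
-- def calculate_bengal_fire_hours(c1, b1):
--     hours = 0
--
--     while c1 > 0 or b1 >= 2:
--         while c1 > 0:
--             c1 -= 1
--             hours += 2
--             b1 += 1
--         while b1 >= 2 and c1 == 0:
--             b1 -= 2
--             c1 += 1
--
--     return hours
-- ===== SOURCE B (Python) =====
-- def calculate_bengal_fire_hours(c1, b1):
--     if c1 <= 0 and b1 < 2:
--         return 0
--     return 2 * (c1 + max(c1 + b1 - 1, 0))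
-- ===== Notes on version B (the rewrite author's own statement) =====
-- stated objective: faster
-- what changed: Replaces A's nested burn/convert simulation loops with the O(1) closed form 2*(c1 + max(c1+b1-1, 0)) derived from the invariant that each burned candle adds 2 hours and leaves a stub, with 2 stubs making a candle; Pre_ excludes c1 < 0 with b1 >= 2, where A's outer loop never terminates (the conversion loop requires c1 == 0).
import Mathlib
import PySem

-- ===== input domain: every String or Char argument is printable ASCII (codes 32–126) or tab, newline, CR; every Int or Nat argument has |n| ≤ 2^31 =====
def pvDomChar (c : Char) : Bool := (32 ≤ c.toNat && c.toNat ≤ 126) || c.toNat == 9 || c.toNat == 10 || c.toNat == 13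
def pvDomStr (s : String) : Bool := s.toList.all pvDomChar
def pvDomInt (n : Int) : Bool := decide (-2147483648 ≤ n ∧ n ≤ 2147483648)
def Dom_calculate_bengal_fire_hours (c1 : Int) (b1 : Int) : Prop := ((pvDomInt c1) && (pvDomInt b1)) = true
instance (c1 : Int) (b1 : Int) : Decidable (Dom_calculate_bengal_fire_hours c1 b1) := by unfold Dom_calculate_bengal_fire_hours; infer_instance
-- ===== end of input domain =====

-- B replaces A's simulation loops by an O(1) closed form 2*(c1 + max(c1+b1-1,0)); faster (asymptotic).

-- ===== PORT A =====
-- inner `while c1 > 0` loop of A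
def pvBurnA (c1 b1 hours : Int) : Int × Int × Int :=
  if 0 < c1 then pvBurnA (c1 - 1) (b1 + 1) (hours + 2) else (c1, b1, hours)
termination_by c1.toNat
decreasing_by omega

-- inner `while b1 >= 2 and c1 == 0` loop of A
def pvConvA (c1 b1 : Int) : Int × Int :=
  if 2 ≤ b1 ∧ c1 = 0 then pvConvA (c1 + 1) (b1 - 2) else (c1, b1)
termination_by b1.toNat
decreasing_by omega

-- outer `while c1 > 0 or b1 >= 2` loop of A, run with fuel (A diverges when c1 < 0 and b1 ≥ 2;
-- the fuel is sufficient on Pre_, where A terminates)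
def pvOuterA : Nat → Int → Int → Int → Int
  | 0, _, _, hours => hours
  | (fuel+1), c1, b1, hours =>
    if 0 < c1 ∨ 2 ≤ b1 then
      match pvBurnA c1 b1 hours with
      | (c1', b1', hours') =>
        match pvConvA c1' b1' with
        | (c1'', b1'') => pvOuterA fuel c1'' b1'' hours'
    else hours

def calculate_bengal_fire_hours (c1 : Int) (b1 : Int) : Int :=
  pvOuterA ((2 * c1 + b1).toNat + 2) c1 b1 0

-- ===== PORT B =====
def calculate_bengal_fire_hours_alt (c1 : Int) (b1 : Int) : Int :=
  if c1 ≤ 0 ∧ b1 < 2 then 0 else 2 * (c1 + max (c1 + b1 - 1) 0)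

-- ===== PRECONDITION & SPEC =====
-- Pre_ excludes exactly the inputs c1 < 0 ∧ b1 ≥ 2, on which A's outer loop never terminates.
def Pre_calculate_bengal_fire_hours (c1 : Int) (b1 : Int) : Prop := 0 ≤ c1 ∨ b1 < 2
instance (c1 : Int) (b1 : Int) : Decidable (Pre_calculate_bengal_fire_hours c1 b1) := by
  unfold Pre_calculate_bengal_fire_hours; infer_instance
def pvWitness_calculate_bengal_fire_hours : Int × Int := (3, 4)

def Spec_calculate_bengal_fire_hours (c1 : Int) (b1 : Int) (out : Int) : Prop := out = calculate_bengal_fire_hours_alt c1 b1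
instance (c1 : Int) (b1 : Int) (out : Int) : Decidable (Spec_calculate_bengal_fire_hours c1 b1 out) := by unfold Spec_calculate_bengal_fire_hours; infer_instance

-- ===== CLAIM (what is proved, stated in full; the proofs are below) =====
def Claim_equal_calculate_bengal_fire_hours : Prop := ∀ (c1 : Int) (b1 : Int), Dom_calculate_bengal_fire_hours c1 b1 → Pre_calculate_bengal_fire_hours c1 b1 → Spec_calculate_bengal_fire_hours c1 b1 (calculate_bengal_fire_hours c1 b1)

-- ===== LEMMAS AND PROOFS =====

theorem pvBurnA_eq (c1 b1 hours : Int) (h : 0 ≤ c1) :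
    pvBurnA c1 b1 hours = (0, b1 + c1, hours + 2 * c1) := by
  obtain ⟨n, rfl⟩ : ∃ n : Nat, c1 = (n : Int) := ⟨c1.toNat, by omega⟩
  induction n generalizing b1 hours with
  | zero => rw [pvBurnA]; simp
  | succ k ih =>
    rw [pvBurnA]
    have hpos : (0 : Int) < ((k + 1 : Nat) : Int) := by positivity
    simp only [hpos, if_pos]
    rw [show ((k + 1 : Nat) : Int) - 1 = ((k : Nat) : Int) from by push_cast; ring,
      ih _ _ (by positivity)]
    refine congrArg _ (congrArg₂ _ (by push_cast; ring) (by push_cast; ring))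

theorem pvConvA_pos (b1 : Int) (h : 2 ≤ b1) : pvConvA 0 b1 = (1, b1 - 2) := by
  rw [pvConvA]
  simp only [h, true_and, if_pos]
  rw [pvConvA]; norm_num

theorem pvConvA_nopos (c1 b1 : Int) (h : ¬ (2 ≤ b1 ∧ c1 = 0)) : pvConvA c1 b1 = (c1, b1) := by
  rw [pvConvA]; simp [h]

-- steady state: c1 = 1, the outer loop burns one candle per iteration
theorem pvOuterA_one (fuel : Nat) : ∀ (b hours : Int),
    max b 0 + 2 ≤ (fuel : Int) → pvOuterA fuel 1 b hours = hours + 2 * (max b 0 + 1) := by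
  induction fuel with
  | zero => intro b hours h; simp at h; omega
  | succ n ih =>
    intro b hours h
    rw [pvOuterA]
    simp only [show (0:Int) < 1 ∨ 2 ≤ b ↔ True from by simp, if_pos trivial]
    rw [pvBurnA_eq 1 b hours (by norm_num)]
    dsimp only
    by_cases hb : 2 ≤ b + 1
    · rw [pvConvA_pos _ hb]
      dsimp only
      rw [ih (b + 1 - 2) (hours + 2 * 1) (by omega)]
      omega
    · rw [pvConvA_nopos _ _ (by omega)]
      dsimp only
      -- next state (0, b+1): condition false, one more fuel step returns hours'
      cases n with
      | zero => simp at h; omega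
      | succ m =>
        rw [pvOuterA]
        have : ¬ ((0:Int) < 0 ∨ 2 ≤ b + 1) := by omega
        simp only [this, if_neg, not_false_iff]
        omega

theorem pvOuterA_main (c1 b1 : Int) (hc : 0 ≤ c1) :
    pvOuterA ((2 * c1 + b1).toNat + 2) c1 b1 0 = calculate_bengal_fire_hours_alt c1 b1 := by
  unfold calculate_bengal_fire_hours_alt
  rw [pvOuterA]
  by_cases hcond : 0 < c1 ∨ 2 ≤ b1
  · simp only [hcond, if_pos]
    have hneg : ¬ (c1 ≤ 0 ∧ b1 < 2) := by omega
    simp only [hneg, if_neg, not_false_iff]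
    rw [pvBurnA_eq c1 b1 0 hc]
    dsimp only
    by_cases hb : 2 ≤ b1 + c1
    · rw [pvConvA_pos _ hb]
      dsimp only
      rw [pvOuterA_one _ _ _ (by omega)]
      omega
    · rw [pvConvA_nopos _ _ (by omega)]
      dsimp only
      -- state (0, b1+c1) with b1+c1 ≤ 1: condition false on the next step
      rw [pvOuterA]
      have : ¬ ((0:Int) < 0 ∨ 2 ≤ b1 + c1) := by omega
      simp only [this, if_neg, not_false_iff]
      omega
  · simp only [hcond, if_neg, not_false_iff]
    have : c1 ≤ 0 ∧ b1 < 2 := by omega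
    simp [this]

-- ===== VERDICT (by name: the statement is the Claim_ definition above) =====
theorem calculate_bengal_fire_hours_spec : Claim_equal_calculate_bengal_fire_hours := by
  intro c1 b1 _ hpre
  unfold Spec_calculate_bengal_fire_hours calculate_bengal_fire_hours
  rcases hpre with hc | hb
  · exact pvOuterA_main c1 b1 hc
  · by_cases hc : 0 ≤ c1
    · exact pvOuterA_main c1 b1 hc
    · -- c1 < 0 and b1 < 2: outer condition is false immediately; both sides are 0
      rw [pvOuterA]
      have h1 : ¬ (0 < c1 ∨ 2 ≤ b1) := by omega
      have h2 : c1 ≤ 0 ∧ b1 < 2 := by omega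
      simp [calculate_bengal_fire_hours_alt, h1, h2]
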